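-- pv_equiv track=rewrite | github.com/bgabrovsek/knotpy | sandbox/bonded (topoly)/old/EHbondles.py | bdiagram
-- ===== SOURCE A (Python) =====
-- def bdiagram(PD):  ### Translates a PD diagram of a theta curve ###
--     ### A planar diagram PD consists of lists of length 5 in CCW orientation,
--     ### corresponding to crossings, where the first entry corresponds to the
--     ### crossing sign (1-positive, -1-negative) and the remaining entries
--     ### correspond to the arcs, starting with the inbound lower arc),
--     ### and lists of length 3 in CCW orientation, corresponding to vertices.
--     ### We rearrange the vertex lists so that each one begins with the bond
--     ### arc and has an additional information about parallel/antiparallel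
--     ### strands (the first entry is either -2 for parallel or -3 for antiparallel)
--     Xi = []
--     Xo = []
--     X = []
--     V = []
--     W = []
--     for P in PD:
--         if len(P) == 5:
--             X = X + [P]
--             if P[1] not in Xi:
--                 Xi = Xi + [P[1]]
--             if P[3] not in Xo:
--                 Xo = Xo + [P[3]]
--             for i in range(3, 6, 2):
--                 if (i == 3 and P[0] == 1 and P[2] not in Xo) or (i == 5 and P[0] == -1 and P[4] not in Xo):
--                     Xo = Xo + [P[i - 1]]
--                 elif P[i - 1] not in Xi:
--                     Xi = Xi + [P[i - 1]]
--         if len(P) == 3: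
--             if P[1] not in Xi and P[1] not in Xo:
--                 P1 = [P[1]] + [P[2]] + [P[0]]
--                 V = V + [P1]
--             elif P[2] not in Xi and P[2] not in Xo:
--                 P2 = [P[2]] + [P[0]] + [P[1]]
--                 V = V + [P2]
--             else:
--                 V = V + [P]
--     for i in range(1, len(V) + 1):
--         for j in range(i + 1, len(V) + 1):
--             if V[i - 1][0] == V[j - 1][0]:
--                 if (V[i - 1][1] in Xi and V[j - 1][1] in Xi):
--                     W.append([-3] + [V[i - 1][2]] + [V[i - 1][1]] + [V[j - 1][2]] + [V[j - 1][1]])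
--                 elif (V[i - 1][1] in Xo and V[j - 1][1] in Xo):
--                     W.append([-3] + V[i - 1][1:] + V[j - 1][1:])
--                 elif (V[i - 1][1] in Xi):
--                     W.append([-2] + V[j - 1][1:] + V[i - 1][1:])
--                 else:
--                     W.append([-2] + V[i - 1][1:] + V[j - 1][1:])
--     return (X + W)
-- ===== SOURCE B (Python) =====
-- def bdiagram(PD):
--     # One dict of (in_Xi, in_Xo) flag pairs replaces the two membership lists;
--     # vertices become (key, s, t) triples; bond pairs are built group-by-group
--     # from a dict index and put back into global (i, j) order by one sort.
--     flags = {}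
--     X = []
--     V = []
--     for P in PD:
--         if len(P) == 5:
--             X.append(P)
--             f = flags.get(P[1], (False, False))
--             flags[P[1]] = (True, f[1])
--             f = flags.get(P[3], (False, False))
--             flags[P[3]] = (f[0], True)
--             f = flags.get(P[2], (False, False))
--             flags[P[2]] = (f[0], True) if P[0] == 1 and not f[1] else (True, f[1])
--             f = flags.get(P[4], (False, False))
--             flags[P[4]] = (f[0], True) if P[0] == -1 and not f[1] else (True, f[1])
--         elif len(P) == 3:
--             w, a, b = P
--             if a not in flags:
--                 V.append((a, b, w))
--             elif b not in flags:
--                 V.append((b, w, a))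
--             else:
--                 V.append((w, a, b))
--     groups = {}
--     for idx, v in enumerate(V):
--         groups.setdefault(v[0], []).append((idx, v))
--     tagged = []
--     for grp in groups.values():
--         tail = grp
--         while tail:
--             i, vi = tail[0]
--             tail = tail[1:]
--             fi = flags.get(vi[1], (False, False))
--             for j, vj in tail:
--                 fj = flags.get(vj[1], (False, False))
--                 if fi[0] and fj[0]:
--                     r = [-3, vi[2], vi[1], vj[2], vj[1]]
--                 elif fi[1] and fj[1]:
--                     r = [-3, vi[1], vi[2], vj[1], vj[2]]
--                 elif fi[0]:
--                     r = [-2, vj[1], vj[2], vi[1], vi[2]]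
--                 else:
--                     r = [-2, vi[1], vi[2], vj[1], vj[2]]
--                 tagged.append((i, j, r))
--     tagged.sort(key=lambda t: (t[0], t[1]))
--     return X + [t[2] for t in tagged]
-- ===== Notes on version B (the rewrite author's own statement) =====
-- stated objective: alternative
-- what changed: A's two membership lists with linear scans become one dict of (in_Xi, in_Xo) flag pairs, the rearranged vertices are stored as triples, and the quadratic all-pairs vertex loop is replaced by a dict grouping vertex indices by bond arc, emitting pairs inside each group and restoring the global (i, j) output order with one sort.
import Mathlib
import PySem

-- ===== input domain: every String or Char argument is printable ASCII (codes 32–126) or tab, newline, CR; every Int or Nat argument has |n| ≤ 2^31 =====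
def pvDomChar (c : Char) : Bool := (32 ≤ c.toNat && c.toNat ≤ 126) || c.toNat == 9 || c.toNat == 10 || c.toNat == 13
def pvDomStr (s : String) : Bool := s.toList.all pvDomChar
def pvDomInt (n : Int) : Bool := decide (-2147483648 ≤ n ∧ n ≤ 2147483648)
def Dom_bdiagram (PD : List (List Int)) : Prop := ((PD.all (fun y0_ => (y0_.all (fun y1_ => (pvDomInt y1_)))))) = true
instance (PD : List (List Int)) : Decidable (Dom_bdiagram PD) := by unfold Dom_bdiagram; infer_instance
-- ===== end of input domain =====

set_option maxHeartbeats 1000000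

-- B replaces A's two membership lists by one dict of (in_Xi, in_Xo) flag pairs, stores the
-- rearranged vertices as triples, and replaces A's all-pairs vertex loop by a dict grouping
-- the vertices by bond arc, emitting each group's pairs and restoring the global (i, j)
-- output order with one sort; the returned value is proved unchanged.

-- in-range indexing P[i] (exact: every use below is guarded by the Python's len(P) checks)
def pvAt (P : List Int) (i : Nat) : Int := P.getD i 0

-- ===== PORT A =====
-- A's append-if-absent update of a membership list ('if x not in L: L = L + [x]')
def pvGuardAdd (s : List Int) (x : Int) : List Int :=
  if s.contains x then s else s ++ [x]

-- one iteration of A's 'for i in range(3, 6, 2)' body, acting on (Xi, Xo)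
def pvIOA (Xi Xo : List Int) (cond : Bool) (a : Int) : List Int × List Int :=
  if cond then (Xi, Xo ++ [a])
  else if !Xi.contains a then (Xi ++ [a], Xo)
  else (Xi, Xo)

-- first pass of A: one step of the 'for P in PD' loop over state (Xi, Xo, X, V)
-- (the 'for i in range(3, 6, 2)' loop is the two unrolled iterations i=3, i=5)
def pvStepA : (List Int × List Int × List (List Int) × List (List Int)) → List Int →
    List Int × List Int × List (List Int) × List (List Int)
  | (Xi, Xo, X, V), P =>
    if P.length = 5 then
      let X := X ++ [P]
      let Xi := pvGuardAdd Xi (pvAt P 1)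
      let Xo := pvGuardAdd Xo (pvAt P 3)
      let io3 := pvIOA Xi Xo (pvAt P 0 == 1 && !Xo.contains (pvAt P 2)) (pvAt P 2)
      let io5 := pvIOA io3.1 io3.2 (pvAt P 0 == -1 && !io3.2.contains (pvAt P 4)) (pvAt P 4)
      (io5.1, io5.2, X, V)
    else if P.length = 3 then
      if !Xi.contains (pvAt P 1) && !Xo.contains (pvAt P 1) then
        (Xi, Xo, X, V ++ [[pvAt P 1, pvAt P 2, pvAt P 0]])
      else if !Xi.contains (pvAt P 2) && !Xo.contains (pvAt P 2) then
        (Xi, Xo, X, V ++ [[pvAt P 2, pvAt P 0, pvAt P 1]])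
      else (Xi, Xo, X, V ++ [P])
    else (Xi, Xo, X, V)

-- the record appended to W (the four-way branch; V entries have length 3, so V[k][1:] = [V[k][1], V[k][2]])
def pvRecA (Xi Xo : List Int) (vi vj : List Int) : List Int :=
  if Xi.contains (pvAt vi 1) && Xi.contains (pvAt vj 1) then
    [-3, pvAt vi 2, pvAt vi 1, pvAt vj 2, pvAt vj 1]
  else if Xo.contains (pvAt vi 1) && Xo.contains (pvAt vj 1) then
    [-3, pvAt vi 1, pvAt vi 2, pvAt vj 1, pvAt vj 2]
  else if Xi.contains (pvAt vi 1) then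
    [-2, pvAt vj 1, pvAt vj 2, pvAt vi 1, pvAt vi 2]
  else
    [-2, pvAt vi 1, pvAt vi 2, pvAt vj 1, pvAt vj 2]

def bdiagram (PD : List (List Int)) : List (List Int) :=
  let st := PD.foldl pvStepA ([], [], [], [])
  let Xi := st.1
  let Xo := st.2.1
  let X := st.2.2.1
  let V := st.2.2.2
  let W := (PySem.List.pyRange 1 ((V.length : Int) + 1) 1).foldl (fun W i =>
    (PySem.List.pyRange (i + 1) ((V.length : Int) + 1) 1).foldl (fun W j =>
      if pvAt (PySem.List.pyGetD V (i - 1) []) 0 == pvAt (PySem.List.pyGetD V (j - 1) []) 0 then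
        W ++ [pvRecA Xi Xo (PySem.List.pyGetD V (i - 1) []) (PySem.List.pyGetD V (j - 1) [])]
      else W) W) []
  X ++ W

-- ===== PORT B =====
-- Source B's flags.get(a, (False, False))
def pvFlagGet (flags : PySem.Dict Int (Bool × Bool)) (a : Int) : Bool × Bool :=
  flags.getD a (false, false)

-- first pass of B: flags is the dict arc -> (in_Xi, in_Xo); V collects (key, s, t) triples
def pvStepB : (PySem.Dict Int (Bool × Bool) × List (List Int) × List (Int × Int × Int)) →
    List Int → PySem.Dict Int (Bool × Bool) × List (List Int) × List (Int × Int × Int)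
  | (flags, X, V), P =>
    if P.length = 5 then
      let X := X ++ [P]
      let f1 := pvFlagGet flags (pvAt P 1)
      let flags := flags.insert (pvAt P 1) (true, f1.2)
      let f3 := pvFlagGet flags (pvAt P 3)
      let flags := flags.insert (pvAt P 3) (f3.1, true)
      let f2 := pvFlagGet flags (pvAt P 2)
      let flags := flags.insert (pvAt P 2)
        (if pvAt P 0 == 1 && !f2.2 then (f2.1, true) else (true, f2.2))
      let f4 := pvFlagGet flags (pvAt P 4)
      let flags := flags.insert (pvAt P 4)
        (if pvAt P 0 == -1 && !f4.2 then (f4.1, true) else (true, f4.2))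
      (flags, X, V)
    else if P.length = 3 then
      if !flags.contains (pvAt P 1) then
        (flags, X, V ++ [(pvAt P 1, pvAt P 2, pvAt P 0)])
      else if !flags.contains (pvAt P 2) then
        (flags, X, V ++ [(pvAt P 2, pvAt P 0, pvAt P 1)])
      else (flags, X, V ++ [(pvAt P 0, pvAt P 1, pvAt P 2)])
    else (flags, X, V)

-- the four-way record of Source B, reading the flag pairs
def pvRecB (flags : PySem.Dict Int (Bool × Bool)) (vi vj : Int × Int × Int) : List Int :=
  let fi := pvFlagGet flags vi.2.1
  let fj := pvFlagGet flags vj.2.1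
  if fi.1 && fj.1 then [-3, vi.2.2, vi.2.1, vj.2.2, vj.2.1]
  else if fi.2 && fj.2 then [-3, vi.2.1, vi.2.2, vj.2.1, vj.2.2]
  else if fi.1 then [-2, vj.2.1, vj.2.2, vi.2.1, vi.2.2]
  else [-2, vi.2.1, vi.2.2, vj.2.1, vj.2.2]

-- Source B's 'while tail:' loop over one group: the head paired with every later member
def pvPairs (flags : PySem.Dict Int (Bool × Bool)) :
    List (Int × (Int × Int × Int)) → List (Int × Int × List Int)
  | [] => []
  | p :: tail =>
      tail.map (fun q => (p.1, q.1, pvRecB flags p.2 q.2)) ++ pvPairs flags tail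

-- groups: dict mapping each bond arc v[0] to the (index, vertex) pairs carrying it
-- (groups.setdefault(v[0], []).append((idx, v)) is Dict.modify with append)
def pvGroupsB (V : List (Int × Int × Int)) : PySem.Dict Int (List (Int × (Int × Int × Int))) :=
  (PySem.List.enumerate V 0).foldl
    (fun g p => g.modify p.2.1 [] (· ++ [p])) PySem.Dict.empty

def bdiagram_alt (PD : List (List Int)) : List (List Int) :=
  let st := PD.foldl pvStepB (PySem.Dict.empty, [], [])
  let flags := st.1
  let X := st.2.1
  let V := st.2.2
  let groups := pvGroupsB V
  let tagged := groups.values.foldl (fun acc grp => acc ++ pvPairs flags grp) []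
  X ++ (PySem.List.sorted2 tagged (fun t => t.1) (fun t => t.2.1)).map (fun t => t.2.2)

-- ===== PRECONDITION & SPEC =====
def Spec_bdiagram (PD : List (List Int)) (out : List (List Int)) : Prop := out = bdiagram_alt PD
instance (PD : List (List Int)) (out : List (List Int)) : Decidable (Spec_bdiagram PD out) := by unfold Spec_bdiagram; infer_instance

-- ===== CLAIM (what is proved, stated in full; the proofs are below) =====
def Claim_equal_bdiagram : Prop := ∀ (PD : List (List Int)), Dom_bdiagram PD → Spec_bdiagram PD (bdiagram PD)

-- ===== LEMMAS AND PROOFS =====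

-- generic list helpers
theorem flatMap_congr_mem {α β : Type} (l : List α) (f g : α → List β)
    (h : ∀ x ∈ l, f x = g x) : l.flatMap f = l.flatMap g := by
  induction l with
  | nil => rfl
  | cons x xs ih =>
    rw [List.flatMap_cons, List.flatMap_cons, h x (by simp),
      ih (fun y hy => h y (by simp [hy]))]

theorem flatMap_filter {α β : Type} (l : List α) (q : α → Bool) (f : α → List β) :
    (l.filter q).flatMap f = l.flatMap (fun x => if q x then f x else []) := by
  induction l with
  | nil => rfl
  | cons x xs ih =>
    rw [List.filter_cons]
    by_cases h : q x = true
    · rw [if_pos h, List.flatMap_cons, List.flatMap_cons, if_pos h, ih]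
    · rw [if_neg h, List.flatMap_cons, if_neg h, ih, List.nil_append]

theorem filter_flatMap {α β : Type} (l : List α) (f : α → List β) (p : β → Bool) :
    (l.flatMap f).filter p = l.flatMap (fun a => (f a).filter p) := by
  induction l with
  | nil => rfl
  | cons a l ih => rw [List.flatMap_cons, List.filter_append, ih, List.flatMap_cons]

theorem pairwise_flatMap {α β : Type} (R : β → β → Prop) (l : List α) (f : α → List β)
    (h1 : ∀ a ∈ l, (f a).Pairwise R)
    (h2 : l.Pairwise (fun a b => ∀ x ∈ f a, ∀ y ∈ f b, R x y)) :
    (l.flatMap f).Pairwise R := by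
  induction l with
  | nil => simp
  | cons a l ih =>
    rw [List.flatMap_cons, List.pairwise_append]
    refine ⟨h1 a (by simp), ih (fun b hb => h1 b (by simp [hb])) h2.of_cons, ?_⟩
    intro x hx y hy
    rw [List.mem_flatMap] at hy
    obtain ⟨b, hb, hyb⟩ := hy
    exact List.rel_of_pairwise_cons h2 hb x hx y hyb

theorem int_beq_comm (a b : Int) : (a == b) = (b == a) := by
  by_cases h : a = b
  · simp [h]
  · have h' : ¬ b = a := fun hh => h hh.symm
    simp [h, h']

theorem contains_eq_decide_mem (s : List Int) (a : Int) :
    s.contains a = decide (a ∈ s) := by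
  cases hc : s.contains a with
  | true => simp [List.contains_iff_mem.mp hc]
  | false =>
    have hns : a ∉ s := fun hm => absurd hc (by simpa using hm)
    simp [hns]

-- ===== first-pass correspondence =====

-- the triple view (l[0], l[1], l[2]) of a vertex record
def pvTrip (l : List Int) : Int × Int × Int := (pvAt l 0, pvAt l 1, pvAt l 2)

-- state correspondence between A's membership lists and B's flag dict
def pvRel (Xi Xo : List Int) (flags : PySem.Dict Int (Bool × Bool)) : Prop :=
  ∀ a : Int, flags.getD a (false, false) = (decide (a ∈ Xi), decide (a ∈ Xo)) ∧
    flags.contains a = decide (a ∈ Xi ∨ a ∈ Xo)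

theorem pvRel_empty : pvRel [] [] PySem.Dict.empty := by
  intro a
  simp [PySem.Dict.getD_empty, PySem.Dict.contains_empty]

theorem mem_pvGuardAdd (s : List Int) (x a : Int) :
    a ∈ pvGuardAdd s x ↔ a ∈ s ∨ a = x := by
  unfold pvGuardAdd
  by_cases h : s.contains x = true
  · have hx : x ∈ s := List.contains_iff_mem.mp h
    rw [if_pos h]
    constructor
    · exact Or.inl
    · rintro (h1 | rfl)
      · exact h1
      · exact hx
  · rw [if_neg h]
    simp

theorem pvRel_markI (Xi Xo : List Int) (flags : PySem.Dict Int (Bool × Bool)) (x : Int)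
    (h : pvRel Xi Xo flags) :
    pvRel (pvGuardAdd Xi x) Xo (flags.insert x (true, (pvFlagGet flags x).2)) := by
  intro a
  have hx := (h x).1
  have ha1 := (h a).1
  have ha2 := (h a).2
  unfold pvFlagGet
  rw [hx]
  constructor
  · rw [PySem.Dict.getD_insert]
    by_cases hax : a = x
    · subst hax
      simp [mem_pvGuardAdd]
    · rw [if_neg hax, ha1]
      have hmm : decide (a ∈ pvGuardAdd Xi x) = decide (a ∈ Xi) :=
        decide_eq_decide.mpr (by simp [mem_pvGuardAdd, hax])
      rw [hmm]
  · rw [PySem.Dict.contains_insert, ha2]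
    by_cases hax : a = x
    · subst hax
      simp [mem_pvGuardAdd]
    · have hmm : decide (a ∈ pvGuardAdd Xi x ∨ a ∈ Xo) = decide (a ∈ Xi ∨ a ∈ Xo) :=
        decide_eq_decide.mpr (by simp [mem_pvGuardAdd, hax])
      rw [hmm]
      simp [hax]

theorem pvRel_markO (Xi Xo : List Int) (flags : PySem.Dict Int (Bool × Bool)) (x : Int)
    (h : pvRel Xi Xo flags) :
    pvRel Xi (pvGuardAdd Xo x) (flags.insert x ((pvFlagGet flags x).1, true)) := by
  intro a
  have hx := (h x).1
  have ha1 := (h a).1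
  have ha2 := (h a).2
  unfold pvFlagGet
  rw [hx]
  constructor
  · rw [PySem.Dict.getD_insert]
    by_cases hax : a = x
    · subst hax
      simp [mem_pvGuardAdd]
    · rw [if_neg hax, ha1]
      have hmm : decide (a ∈ pvGuardAdd Xo x) = decide (a ∈ Xo) :=
        decide_eq_decide.mpr (by simp [mem_pvGuardAdd, hax])
      rw [hmm]
  · rw [PySem.Dict.contains_insert, ha2]
    by_cases hax : a = x
    · subst hax
      simp [mem_pvGuardAdd]
    · have hmm : decide (a ∈ Xi ∨ a ∈ pvGuardAdd Xo x) = decide (a ∈ Xi ∨ a ∈ Xo) :=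
        decide_eq_decide.mpr (by simp [mem_pvGuardAdd, hax])
      rw [hmm]
      simp [hax]

-- A's unguarded 'Xo = Xo + [a]' equals the guarded add when a is not yet in Xo
theorem append_eq_guardAdd (s : List Int) (x : Int) (h : x ∉ s) :
    s ++ [x] = pvGuardAdd s x := by
  unfold pvGuardAdd
  rw [if_neg (by simpa [contains_eq_decide_mem] using h)]

-- one crossing sub-step: A's pvIOA matches B's conditional flag insert
theorem pvIO_corr (Xi Xo : List Int) (flags : PySem.Dict Int (Bool × Bool)) (c : Bool) (a : Int)
    (h : pvRel Xi Xo flags) :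
    pvRel (pvIOA Xi Xo (c && !Xo.contains a) a).1 (pvIOA Xi Xo (c && !Xo.contains a) a).2
      (flags.insert a
        (if c && !(pvFlagGet flags a).2 then ((pvFlagGet flags a).1, true)
         else (true, (pvFlagGet flags a).2))) := by
  have hf : pvFlagGet flags a = (decide (a ∈ Xi), decide (a ∈ Xo)) := (h a).1
  have hcc : (c && !(pvFlagGet flags a).2) = (c && !Xo.contains a) := by
    rw [hf, contains_eq_decide_mem]
  by_cases hc : (c && !Xo.contains a) = true
  · have hcB : (c && !(pvFlagGet flags a).2) = true := hcc.trans hc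
    rw [if_pos hcB]
    unfold pvIOA
    rw [if_pos hc]
    have hao : a ∉ Xo := by
      intro hm
      rw [contains_eq_decide_mem] at hc
      simp [hm] at hc
    have hres := pvRel_markO Xi Xo flags a h
    rw [append_eq_guardAdd Xo a hao]
    exact hres
  · have hcB : ¬ ((c && !(pvFlagGet flags a).2) = true) := fun hh => hc (hcc.symm.trans hh)
    rw [if_neg hcB]
    unfold pvIOA
    rw [if_neg hc]
    have hB := pvRel_markI Xi Xo flags a h
    by_cases hXi : Xi.contains a = true
    · rw [if_neg (by rw [hXi]; simp)]
      have hg : pvGuardAdd Xi a = Xi := by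
        unfold pvGuardAdd
        rw [if_pos hXi]
      rw [hg] at hB
      exact hB
    · have hXif : Xi.contains a = false := by
        revert hXi
        cases Xi.contains a <;> simp
      rw [if_pos (by rw [hXif]; rfl)]
      have hmem : a ∉ Xi := fun hm => hXi (List.contains_iff_mem.mpr hm)
      rw [append_eq_guardAdd Xi a hmem]
      exact hB

-- full first-pass correspondence, one step
theorem pvStep_corr (Xi Xo : List Int) (flags : PySem.Dict Int (Bool × Bool))
    (X : List (List Int)) (V : List (List Int)) (P : List Int) (h : pvRel Xi Xo flags) :
    (pvStepB (flags, X, V.map pvTrip) P).2.1 = (pvStepA (Xi, Xo, X, V) P).2.2.1 ∧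
    (pvStepB (flags, X, V.map pvTrip) P).2.2 = (pvStepA (Xi, Xo, X, V) P).2.2.2.map pvTrip ∧
    pvRel (pvStepA (Xi, Xo, X, V) P).1 (pvStepA (Xi, Xo, X, V) P).2.1
      (pvStepB (flags, X, V.map pvTrip) P).1 := by
  by_cases h5 : P.length = 5
  · have h1 := pvRel_markI Xi Xo flags (pvAt P 1) h
    have h3' := pvRel_markO (pvGuardAdd Xi (pvAt P 1)) Xo _ (pvAt P 3) h1
    have hio3 := pvIO_corr (pvGuardAdd Xi (pvAt P 1)) (pvGuardAdd Xo (pvAt P 3)) _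
      (pvAt P 0 == 1) (pvAt P 2) h3'
    have hio5 := pvIO_corr _ _ _ (pvAt P 0 == -1) (pvAt P 4) hio3
    refine ⟨?_, ?_, ?_⟩
    · simp only [pvStepA, pvStepB, if_pos h5]
    · simp only [pvStepA, pvStepB, if_pos h5]
    · simp only [pvStepA, pvStepB, if_pos h5]
      exact hio5
  · by_cases h3 : P.length = 3
    · have hA1 : (!Xi.contains (pvAt P 1) && !Xo.contains (pvAt P 1)) =
          !flags.contains (pvAt P 1) := by
        rw [(h _).2, contains_eq_decide_mem, contains_eq_decide_mem]
        by_cases hxm : pvAt P 1 ∈ Xi <;> by_cases hom : pvAt P 1 ∈ Xo <;> simp [hxm, hom]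
      have hA2 : (!Xi.contains (pvAt P 2) && !Xo.contains (pvAt P 2)) =
          !flags.contains (pvAt P 2) := by
        rw [(h _).2, contains_eq_decide_mem, contains_eq_decide_mem]
        by_cases hxm : pvAt P 2 ∈ Xi <;> by_cases hom : pvAt P 2 ∈ Xo <;> simp [hxm, hom]
      by_cases hb1 : (!Xi.contains (pvAt P 1) && !Xo.contains (pvAt P 1)) = true
      · have hB1 : (!flags.contains (pvAt P 1)) = true := hA1.symm.trans hb1
        refine ⟨?_, ?_, ?_⟩
        · simp only [pvStepA, pvStepB, if_neg h5, if_pos h3, if_pos hb1, if_pos hB1]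
        · simp only [pvStepA, pvStepB, if_neg h5, if_pos h3, if_pos hb1, if_pos hB1]
          rw [List.map_append]
          rfl
        · simp only [pvStepA, pvStepB, if_neg h5, if_pos h3, if_pos hb1, if_pos hB1]
          exact h
      · have hB1 : ¬ ((!flags.contains (pvAt P 1)) = true) := fun hh => hb1 (hA1.trans hh)
        by_cases hb2 : (!Xi.contains (pvAt P 2) && !Xo.contains (pvAt P 2)) = true
        · have hB2 : (!flags.contains (pvAt P 2)) = true := hA2.symm.trans hb2
          refine ⟨?_, ?_, ?_⟩
          · simp only [pvStepA, pvStepB, if_neg h5, if_pos h3, if_neg hb1, if_neg hB1,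
              if_pos hb2, if_pos hB2]
          · simp only [pvStepA, pvStepB, if_neg h5, if_pos h3, if_neg hb1, if_neg hB1,
              if_pos hb2, if_pos hB2]
            rw [List.map_append]
            rfl
          · simp only [pvStepA, pvStepB, if_neg h5, if_pos h3, if_neg hb1, if_neg hB1,
              if_pos hb2, if_pos hB2]
            exact h
        · have hB2 : ¬ ((!flags.contains (pvAt P 2)) = true) := fun hh => hb2 (hA2.trans hh)
          refine ⟨?_, ?_, ?_⟩
          · simp only [pvStepA, pvStepB, if_neg h5, if_pos h3, if_neg hb1, if_neg hB1,
              if_neg hb2, if_neg hB2]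
          · simp only [pvStepA, pvStepB, if_neg h5, if_pos h3, if_neg hb1, if_neg hB1,
              if_neg hb2, if_neg hB2]
            rw [List.map_append]
            rfl
          · simp only [pvStepA, pvStepB, if_neg h5, if_pos h3, if_neg hb1, if_neg hB1,
              if_neg hb2, if_neg hB2]
            exact h
    · refine ⟨?_, ?_, ?_⟩
      · simp only [pvStepA, pvStepB, if_neg h5, if_neg h3]
      · simp only [pvStepA, pvStepB, if_neg h5, if_neg h3]
      · simp only [pvStepA, pvStepB, if_neg h5, if_neg h3]
        exact h

-- first-pass correspondence over the whole fold
theorem pvFold_corr (PD : List (List Int)) :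
    ∀ (Xi Xo : List Int) (flags : PySem.Dict Int (Bool × Bool)) (X V : List (List Int)),
    pvRel Xi Xo flags →
    (PD.foldl pvStepB (flags, X, V.map pvTrip)).2.1 = (PD.foldl pvStepA (Xi, Xo, X, V)).2.2.1 ∧
    (PD.foldl pvStepB (flags, X, V.map pvTrip)).2.2 =
      (PD.foldl pvStepA (Xi, Xo, X, V)).2.2.2.map pvTrip ∧
    pvRel (PD.foldl pvStepA (Xi, Xo, X, V)).1 (PD.foldl pvStepA (Xi, Xo, X, V)).2.1
      (PD.foldl pvStepB (flags, X, V.map pvTrip)).1 := by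
  induction PD with
  | nil => intro Xi Xo flags X V h; exact ⟨rfl, rfl, h⟩
  | cons P PD ih =>
    intro Xi Xo flags X V h
    obtain ⟨hX, hV, hrel⟩ := pvStep_corr Xi Xo flags X V P h
    simp only [List.foldl_cons]
    have hBeta : pvStepB (flags, X, V.map pvTrip) P =
        ((pvStepB (flags, X, V.map pvTrip) P).1,
         (pvStepA (Xi, Xo, X, V) P).2.2.1,
         (pvStepA (Xi, Xo, X, V) P).2.2.2.map pvTrip) := by
      rw [← hX, ← hV]
    have hAeta : pvStepA (Xi, Xo, X, V) P =
        ((pvStepA (Xi, Xo, X, V) P).1, (pvStepA (Xi, Xo, X, V) P).2.1,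
         (pvStepA (Xi, Xo, X, V) P).2.2.1, (pvStepA (Xi, Xo, X, V) P).2.2.2) := rfl
    rw [hBeta, hAeta]
    exact ih _ _ _ _ _ hrel

-- ===== A's second pass in canonical form =====

-- the key of vertex k
def pvKey (V : List (List Int)) (k : Nat) : Int := pvAt (V.getD k []) 0

-- tagged canonical form: ((i, j), record) for all i < j with equal keys, in lex order
def pvPairT (Xi Xo : List Int) (V : List (List Int)) (i j : Nat) : Int × Int × List Int :=
  ((i : Int), (j : Int), pvRecA Xi Xo (V.getD i []) (V.getD j []))

def pvCanonT (Xi Xo : List Int) (V : List (List Int)) : List (Int × Int × List Int) :=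
  (List.range V.length).flatMap (fun i =>
    ((List.range V.length).filter (fun j => decide (i < j) && (pvKey V i == pvKey V j))).map
      (fun j => pvPairT Xi Xo V i j))

-- canonical form of the second pass (untagged records)
def pvCanon (Xi Xo : List Int) (V : List (List Int)) : List (List Int) :=
  (List.range V.length).flatMap (fun i =>
    ((List.range V.length).filter (fun j => decide (i < j) && (pvKey V i == pvKey V j))).map
      (fun j => pvRecA Xi Xo (V.getD i []) (V.getD j [])))

theorem pvCanon_eq_map (Xi Xo : List Int) (V : List (List Int)) :
    pvCanon Xi Xo V = (pvCanonT Xi Xo V).map (fun t => t.2.2) := by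
  unfold pvCanon pvCanonT
  rw [List.map_flatMap]
  refine flatMap_congr_mem _ _ _ (fun i _ => ?_)
  rw [List.map_map]
  rfl

theorem range_filter_lt (n k : Nat) (q : Nat → Bool) :
    (List.range n).filter (fun j => decide (k < j) && q j) =
      ((List.range (n - (k + 1))).map (fun m => k + 1 + m)).filter q := by
  by_cases h : k + 1 ≤ n
  · have hn : n = (k + 1) + (n - (k + 1)) := by omega
    rw [hn, List.range_add, List.filter_append, Nat.add_sub_cancel_left]
    have h1 : (List.range (k + 1)).filter (fun j => decide (k < j) && q j) = [] := by
      refine List.filter_eq_nil_iff.mpr ?_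
      intro a ha
      have : a < k + 1 := List.mem_range.mp ha
      simp [Nat.not_lt.mpr (by omega : a ≤ k)]
    rw [h1, List.nil_append, List.filter_map, List.filter_map]
    refine congrArg _ (List.filter_congr ?_)
    intro m _
    simp [Function.comp_apply, show k < k + 1 + m from by omega]
  · have h0 : n - (k + 1) = 0 := by omega
    rw [h0]
    simp only [List.range_zero, List.map_nil, List.filter_nil]
    refine List.filter_eq_nil_iff.mpr ?_
    intro a ha
    have : a < n := List.mem_range.mp ha
    simp [Nat.not_lt.mpr (by omega : a ≤ k)]

theorem enum_eq {α : Type} (d : α) (V : List α) (s : Int) :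
    PySem.List.enumerate V s =
      (List.range V.length).map (fun (k : Nat) => ((s + k : Int), V.getD k d)) := by
  induction V generalizing s with
  | nil => simp [PySem.List.enumerate_nil]
  | cons x xs ih =>
    rw [PySem.List.enumerate_cons, ih]
    simp only [List.length_cons, List.range_succ_eq_map, List.map_cons, List.map_map,
      Nat.cast_zero, add_zero, List.getD_cons_zero]
    refine congrArg₂ List.cons rfl ?_
    refine List.map_congr_left ?_
    intro k _
    simp only [Function.comp_apply, Nat.succ_eq_add_one, List.getD_cons_succ]
    refine congrArg₂ Prod.mk ?_ rfl
    push_cast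
    ring

theorem wA_eq (Xi Xo : List Int) (V : List (List Int)) :
    ((PySem.List.pyRange 1 ((V.length : Int) + 1) 1).foldl (fun W i =>
      (PySem.List.pyRange (i + 1) ((V.length : Int) + 1) 1).foldl (fun W j =>
        if pvAt (PySem.List.pyGetD V (i - 1) []) 0 == pvAt (PySem.List.pyGetD V (j - 1) []) 0 then
          W ++ [pvRecA Xi Xo (PySem.List.pyGetD V (i - 1) []) (PySem.List.pyGetD V (j - 1) [])]
        else W) W) []) = pvCanon Xi Xo V := by
  simp only [PySem.List.foldl_append_if, PySem.List.foldl_append_eq_flatMap, List.nil_append]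
  rw [PySem.List.pyRange_one]
  have hlen : ((V.length : Int) + 1 - 1).toNat = V.length := by omega
  rw [hlen, List.flatMap_map]
  unfold pvCanon
  congr 1
  funext k
  rw [PySem.List.pyRange_one]
  have hlen2 : ((V.length : Int) + 1 - (1 + (k : Int) + 1)).toNat = V.length - (k + 1) := by omega
  rw [hlen2]
  rw [range_filter_lt V.length k (fun j => pvKey V k == pvKey V j)]
  rw [List.filter_map, List.filter_map, List.map_map, List.map_map]
  have h1 : (1 : Int) + (k : Int) - 1 = ((k : Nat) : Int) := by ring
  have hc : ∀ m ∈ List.range (V.length - (k + 1)),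
      ((fun j => pvAt (PySem.List.pyGetD V ((1 + (k : Int)) - 1) []) 0 ==
          pvAt (PySem.List.pyGetD V (j - 1) []) 0) ∘ fun (m : Nat) => 1 + (k : Int) + 1 + m) m =
      ((fun j => pvKey V k == pvKey V j) ∘ fun m => k + 1 + m) m := by
    intro m _
    have h2 : (1 : Int) + (k : Int) + 1 + (m : Int) - 1 = ((k + 1 + m : Nat) : Int) := by
      push_cast; ring
    simp only [Function.comp_apply, h1, h2, PySem.List.pyGetD_natCast, pvKey]
  rw [List.filter_congr hc]
  refine List.map_congr_left ?_
  intro m _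
  have h2 : (1 : Int) + (k : Int) + 1 + (m : Int) - 1 = ((k + 1 + m : Nat) : Int) := by
    push_cast; ring
  simp only [Function.comp_apply, h1, h2, PySem.List.pyGetD_natCast]

-- ===== B's second pass equals the canonical form =====

-- the record builders agree through the correspondence
theorem pvRec_corr (Xi Xo : List Int) (flags : PySem.Dict Int (Bool × Bool))
    (h : pvRel Xi Xo flags) (vi vj : List Int) :
    pvRecB flags (pvTrip vi) (pvTrip vj) = pvRecA Xi Xo vi vj := by
  simp only [pvRecB, pvRecA, pvFlagGet, pvTrip, (h (pvAt vi 1)).1, (h (pvAt vj 1)).1,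
    contains_eq_decide_mem]

-- pvPairs on a strictly increasing index list, written as a flatMap
theorem pvPairs_flat (flags : PySem.Dict Int (Bool × Bool)) (h : Nat → Int × (Int × Int × Int)) :
    ∀ (I : List Nat), I.Pairwise (· < ·) →
    pvPairs flags (I.map h) =
      I.flatMap (fun i => (I.filter (fun j => decide (i < j))).map
        (fun j => ((h i).1, (h j).1, pvRecB flags (h i).2 (h j).2))) := by
  intro I
  induction I with
  | nil => intro _; rfl
  | cons i tl ih =>
    intro hpw
    have hhead : ∀ j ∈ tl, i < j := fun j hj => List.rel_of_pairwise_cons hpw hj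
    rw [List.map_cons, List.flatMap_cons]
    show (tl.map h).map (fun q => ((h i).1, q.1, pvRecB flags (h i).2 q.2)) ++
        pvPairs flags (tl.map h) = _
    have hfh : (i :: tl).filter (fun j => decide (i < j)) = tl := by
      rw [List.filter_cons, if_neg (by simp)]
      exact List.filter_eq_self.mpr (fun j hj => by simpa using hhead j hj)
    rw [hfh, ih hpw.of_cons, List.map_map]
    congr 1
    refine (flatMap_congr_mem _ _ _ (fun i' hi' => ?_))
    have hfc : (i :: tl).filter (fun j => decide (i' < j)) =
        tl.filter (fun j => decide (i' < j)) := by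
      rw [List.filter_cons,
        if_neg (by simp only [decide_eq_true_eq]; exact Nat.not_lt.mpr (le_of_lt (hhead i' hi')))]
    rw [hfc]

-- partition of a list by the distinct values of a key function
theorem partition_perm {α : Type} (K : List Int) (tkey : α → Int) :
    ∀ (xs : List α), K.Nodup → (∀ x ∈ xs, tkey x ∈ K) →
    (K.flatMap (fun c => xs.filter (fun x => tkey x == c))).Perm xs := by
  induction K with
  | nil =>
    intro xs _ hmem
    have hnil : xs = [] := by
      cases xs with
      | nil => rfl
      | cons y ys => exact absurd (hmem y (by simp)) (by simp)
    simp [hnil]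
  | cons c K' ih =>
    intro xs hnd hmem
    rw [List.flatMap_cons]
    have hperm1 : (xs.filter (fun x => tkey x == c) ++
        xs.filter (fun x => !(tkey x == c))).Perm xs := List.filter_append_perm _ xs
    have hcK' : c ∉ K' := (List.nodup_cons.mp hnd).1
    have hndK' : K'.Nodup := (List.nodup_cons.mp hnd).2
    have hmem' : ∀ x ∈ xs.filter (fun x => !(tkey x == c)), tkey x ∈ K' := by
      intro x hx
      rw [List.mem_filter] at hx
      rcases List.mem_cons.mp (hmem x hx.1) with hk | hk
      · exact absurd hx.2 (by simp [hk])
      · exact hk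
    have hperm2 := ih (xs.filter (fun x => !(tkey x == c))) hndK' hmem'
    have heq : K'.flatMap (fun c' => (xs.filter (fun x => !(tkey x == c))).filter
        (fun x => tkey x == c')) = K'.flatMap (fun c' => xs.filter (fun x => tkey x == c')) := by
      refine flatMap_congr_mem _ _ _ (fun c' hc' => ?_)
      rw [List.filter_filter]
      refine List.filter_congr (fun x _ => ?_)
      by_cases hx : tkey x = c'
      · have hne : ¬ c' = c := fun hh => hcK' (hh ▸ hc')
        simp [hx, hne]
      · simp [hx]
    rw [heq] at hperm2
    exact (List.Perm.append_left _ hperm2).trans hperm1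

-- key of a tagged pair, read from its first component
def pvTKey (V : List (List Int)) (t : Int × Int × List Int) : Int :=
  pvAt (PySem.List.pyGetD V t.1 []) 0

theorem pvTKey_pairT (Xi Xo : List Int) (V : List (List Int)) (i j : Nat) :
    pvTKey V (pvPairT Xi Xo V i j) = pvKey V i := by
  simp only [pvTKey, pvPairT, PySem.List.pyGetD_natCast]
  rfl

-- the canonical tagged list is strictly lex-increasing in its (i, j) tags
theorem canonT_pairwise (Xi Xo : List Int) (V : List (List Int)) :
    (pvCanonT Xi Xo V).Pairwise
      (fun a b => a.1 < b.1 ∨ (a.1 = b.1 ∧ a.2.1 < b.2.1)) := by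
  unfold pvCanonT
  refine pairwise_flatMap _ _ _ ?_ ?_
  · intro i _
    rw [List.pairwise_map]
    refine ((List.pairwise_lt_range).filter _).imp ?_
    intro j j' hjj'
    right
    refine ⟨rfl, ?_⟩
    show (j : Int) < (j' : Int)
    exact_mod_cast hjj'
  · refine (List.pairwise_lt_range).imp ?_
    intro i i' hii' x hx y hy
    rw [List.mem_map] at hx hy
    obtain ⟨j, -, rfl⟩ := hx
    obtain ⟨j', -, rfl⟩ := hy
    left
    show (i : Int) < (i' : Int)
    exact_mod_cast hii'

-- the canonical tagged list filtered to one key value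
theorem canonT_filter (Xi Xo : List Int) (V : List (List Int)) (c : Int) :
    (pvCanonT Xi Xo V).filter (fun t => pvTKey V t == c) =
      (List.range V.length).flatMap (fun i =>
        if pvKey V i == c then
          ((List.range V.length).filter (fun j => decide (i < j) && (pvKey V j == c))).map
            (fun j => pvPairT Xi Xo V i j)
        else []) := by
  unfold pvCanonT
  rw [filter_flatMap]
  refine flatMap_congr_mem _ _ _ (fun i _ => ?_)
  rw [List.filter_map]
  by_cases hc : (pvKey V i == c) = true
  · rw [if_pos hc]
    rw [List.filter_congr (fun j _ => by
      show ((fun t => pvTKey V t == c) ∘ fun j => pvPairT Xi Xo V i j) j = true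
      simp only [Function.comp_apply]
      rw [pvTKey_pairT]
      exact hc)]
    rw [List.filter_true]
    refine congrArg _ ?_
    refine List.filter_congr (fun j _ => ?_)
    have hci : pvKey V i = c := by simpa using hc
    rw [hci, int_beq_comm c (pvKey V j)]
  · rw [if_neg hc]
    rw [List.filter_congr (fun j _ => by
      show ((fun t => pvTKey V t == c) ∘ fun j => pvPairT Xi Xo V i j) j = false
      simp only [Function.comp_apply]
      rw [pvTKey_pairT]
      simpa using hc)]
    rw [List.filter_false, List.map_nil]

-- Python's stable sort by the tuple key (t[0], t[1]): any strictly lex-increasing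
-- rearrangement is the sorted order
theorem sorted2_eq_of_perm_of_pairwise_lexlt {α : Type} (xs ys : List α) (k1 k2 : α → Int)
    (hperm : ys.Perm xs)
    (hpw : ys.Pairwise (fun a b => k1 a < k1 b ∨ (k1 a = k1 b ∧ k2 a < k2 b))) :
    PySem.List.sorted2 xs k1 k2 = ys := by
  have hb : (fun (a b : α) => decide (k1 a < k1 b) || !decide (k1 b < k1 a) && decide (k2 a < k2 b))
      = (fun a b => decide ((toLex (k1 a, k2 a) : Lex (Int × Int)) < toLex (k1 b, k2 b))) := by
    funext a b
    have hd : decide ((toLex (k1 a, k2 a) : Lex (Int × Int)) < toLex (k1 b, k2 b)) =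
        decide (k1 a < k1 b ∨ (k1 a = k1 b ∧ k2 a < k2 b)) :=
      decide_eq_decide.mpr Prod.Lex.lt_iff
    rw [hd]
    by_cases h1 : k1 a < k1 b <;> by_cases h2 : k1 b < k1 a <;> by_cases h3 : k2 a < k2 b <;>
      simp [h1, h2, h3] <;> omega
  have hkey : PySem.List.sorted2 xs k1 k2 =
      PySem.List.sorted xs (fun a => (toLex (k1 a, k2 a) : Lex (Int × Int))) := by
    show xs.foldl (fun acc x => PySem.List.insertBy
        (fun a b => decide (k1 a < k1 b) || !decide (k1 b < k1 a) && decide (k2 a < k2 b)) x acc) []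
      = xs.foldl (fun acc x => PySem.List.insertBy
        (fun a b => decide ((toLex (k1 a, k2 a) : Lex (Int × Int)) < toLex (k1 b, k2 b))) x acc) []
    rw [hb]
  rw [hkey]
  exact PySem.List.sorted_eq_of_perm_of_pairwise_lt xs ys _ hperm
    (hpw.imp fun hab => Prod.Lex.lt_iff.mpr hab)

-- the enumerate of the triple list, over indices
theorem enum_VB (V : List (List Int)) :
    PySem.List.enumerate (V.map pvTrip) 0 =
      (List.range V.length).map (fun (k : Nat) => ((k : Int), pvTrip (V.getD k []))) := by
  rw [enum_eq (pvTrip [])]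
  rw [List.length_map]
  refine List.map_congr_left (fun k _ => ?_)
  rw [List.getD_map V [] pvTrip, zero_add]

-- the group dict: lookups, keys, key uniqueness
theorem groupsB_getD (V : List (Int × Int × Int)) (c : Int) :
    (pvGroupsB V).getD c [] =
      (PySem.List.enumerate V 0).filter (fun p => p.2.1 == c) := by
  unfold pvGroupsB
  rw [show ((PySem.List.enumerate V 0).foldl (fun g p => g.modify p.2.1 [] (· ++ [p]))
        PySem.Dict.empty)
      = (((PySem.List.enumerate V 0).map (fun p => (p.2.1, p))).foldl
          (fun d q => d.modify q.1 [] (· ++ [q.2])) PySem.Dict.empty) from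
    (List.foldl_map (f := fun (p : Int × (Int × Int × Int)) => (p.2.1, p))
      (g := fun (d : PySem.Dict Int (List (Int × (Int × Int × Int))))
          (q : Int × (Int × (Int × Int × Int))) => d.modify q.1 [] (· ++ [q.2]))
      (l := PySem.List.enumerate V 0) (init := PySem.Dict.empty)).symm]
  rw [PySem.Dict.getD_foldl_modify_append]
  rw [PySem.Dict.getD_empty, List.nil_append]
  rw [List.filter_map, List.map_map]
  have hid : ((fun (q : Int × (Int × (Int × Int × Int))) => q.2) ∘
      (fun (p : Int × (Int × Int × Int)) => (p.2.1, p))) = id := rfl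
  rw [hid, List.map_id]
  rfl

theorem groupsB_keys (V : List (Int × Int × Int)) :
    (pvGroupsB V).keys =
      PySem.Set.ofList ((PySem.List.enumerate V 0).map (fun p => p.2.1)) := by
  unfold pvGroupsB
  rw [PySem.Dict.keys_foldl_modify_key (PySem.List.enumerate V 0) (fun p => p.2.1) []
    (fun _ p => (· ++ [p])) PySem.Dict.empty]
  rw [PySem.Dict.keys_empty, PySem.Set.ofList_eq_foldl]
  rfl

theorem groupsB_nodup (V : List (Int × Int × Int)) : (pvGroupsB V).keys.Nodup := by
  unfold pvGroupsB
  refine PySem.Dict.nodup_keys_foldl_modify_key _ _ _ _ _ ?_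
  rw [PySem.Dict.keys_empty]
  exact List.nodup_nil

-- B's whole second pass produces exactly the canonical record list
theorem altW_eq (Xi Xo : List Int) (flags : PySem.Dict Int (Bool × Bool)) (V : List (List Int))
    (h : pvRel Xi Xo flags) :
    (PySem.List.sorted2
      ((pvGroupsB (V.map pvTrip)).values.foldl (fun acc grp => acc ++ pvPairs flags grp) [])
      (fun t => t.1) (fun t => t.2.1)).map (fun t => t.2.2) = pvCanon Xi Xo V := by
  have hkeys : (pvGroupsB (V.map pvTrip)).keys =
      PySem.Set.ofList ((List.range V.length).map (fun k => pvKey V k)) := by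
    rw [groupsB_keys, enum_VB, List.map_map]
    rfl
  have htag : (pvGroupsB (V.map pvTrip)).values.foldl (fun acc grp => acc ++ pvPairs flags grp) []
      = (PySem.Set.ofList ((List.range V.length).map (fun k => pvKey V k))).flatMap
          (fun c => pvPairs flags ((PySem.List.enumerate (V.map pvTrip) 0).filter
            (fun p => p.2.1 == c))) := by
    rw [PySem.List.foldl_append_eq_flatMap, List.nil_append]
    rw [PySem.Dict.values_eq_map_keys _ (groupsB_nodup _) []]
    rw [List.flatMap_map, hkeys]
    refine flatMap_congr_mem _ _ _ (fun c _ => ?_)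
    rw [groupsB_getD]
  have hperkey : ∀ c, pvPairs flags ((PySem.List.enumerate (V.map pvTrip) 0).filter
      (fun p => p.2.1 == c)) =
      (List.range V.length).flatMap (fun i =>
        if pvKey V i == c then
          ((List.range V.length).filter (fun j => decide (i < j) && (pvKey V j == c))).map
            (fun j => pvPairT Xi Xo V i j)
        else []) := by
    intro c
    rw [enum_VB, List.filter_map]
    have hI : ((List.range V.length).filter
        ((fun (p : Int × (Int × Int × Int)) => p.2.1 == c) ∘
          (fun (k : Nat) => ((k : Int), pvTrip (V.getD k []))))) =
        (List.range V.length).filter (fun k => pvKey V k == c) := rfl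
    rw [hI]
    rw [pvPairs_flat flags _ _ ((List.pairwise_lt_range).filter _)]
    rw [flatMap_filter]
    refine flatMap_congr_mem _ _ _ (fun i _ => ?_)
    by_cases hc : (pvKey V i == c) = true
    · rw [if_pos hc, if_pos hc]
      rw [List.filter_filter]
      refine List.map_congr_left (fun j _ => ?_)
      show ((i : Int), (j : Int), pvRecB flags (pvTrip (V.getD i [])) (pvTrip (V.getD j []))) =
        pvPairT Xi Xo V i j
      rw [pvRec_corr Xi Xo flags h]
      rfl
    · rw [if_neg hc, if_neg hc]
  have hmemK : ∀ t ∈ pvCanonT Xi Xo V,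
      pvTKey V t ∈ PySem.Set.ofList ((List.range V.length).map (fun k => pvKey V k)) := by
    intro t ht
    rw [PySem.Set.mem_ofList]
    unfold pvCanonT at ht
    rw [List.mem_flatMap] at ht
    obtain ⟨i, hi, hti⟩ := ht
    rw [List.mem_map] at hti
    obtain ⟨j, -, rfl⟩ := hti
    rw [List.mem_map]
    exact ⟨i, hi, (pvTKey_pairT Xi Xo V i j).symm⟩
  have hsorted : PySem.List.sorted2
      ((pvGroupsB (V.map pvTrip)).values.foldl (fun acc grp => acc ++ pvPairs flags grp) [])
      (fun t => t.1) (fun t => t.2.1) = pvCanonT Xi Xo V := by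
    refine sorted2_eq_of_perm_of_pairwise_lexlt _ _ _ _ ?_ (canonT_pairwise Xi Xo V)
    rw [htag]
    have heq2 : (PySem.Set.ofList ((List.range V.length).map (fun k => pvKey V k))).flatMap
        (fun c => pvPairs flags ((PySem.List.enumerate (V.map pvTrip) 0).filter
          (fun p => p.2.1 == c))) =
        (PySem.Set.ofList ((List.range V.length).map (fun k => pvKey V k))).flatMap
          (fun c => (pvCanonT Xi Xo V).filter (fun t => pvTKey V t == c)) :=
      flatMap_congr_mem _ _ _ (fun c _ => (hperkey c).trans (canonT_filter Xi Xo V c).symm)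
    rw [heq2]
    exact (partition_perm _ (pvTKey V) (pvCanonT Xi Xo V) (PySem.Set.nodup_ofList _) hmemK).symm
  rw [hsorted, ← pvCanon_eq_map]

-- ===== VERDICT (by name: the statement is the Claim_ definition above) =====
theorem bdiagram_spec : Claim_equal_bdiagram := by
  intro PD _
  show bdiagram PD = bdiagram_alt PD
  simp only [bdiagram, bdiagram_alt]
  have h0 := pvFold_corr PD [] [] PySem.Dict.empty [] [] pvRel_empty
  simp only [List.map_nil] at h0
  obtain ⟨hX, hV, hrel⟩ := h0
  rw [hX, hV, altW_eq _ _ _ _ hrel, wA_eq]
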